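-- pv_equiv track=rewrite | github.com/aws-samples/sample-suricata-generator | rule_analyzer.py | _tokenize_rule_options
-- ===== SOURCE A (Python) =====
-- from typing import List, Dict, Optional, Tuple
--
-- def _tokenize_rule_options(content: str) -> List[str]:
--     """Tokenize rule options by splitting on semicolons while respecting quotes
--
--     Args:
--         content: Rule content string with semicolon-separated options
--
--     Returns:
--         List of token strings
--     """
--     tokens = []
--     current_token = ""
--     in_quotes = False
--     quote_char = None
--
--     for char in content:
--         if char in ('"', "'") and (not in_quotes or char == quote_char):
--             in_quotes = not in_quotes
--             quote_char = char if in_quotes else None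
--             current_token += char
--         elif char == ';' and not in_quotes:
--             if current_token.strip():
--                 tokens.append(current_token.strip())
--             current_token = ""
--         else:
--             current_token += char
--
--     # Add the last token if there is one
--     if current_token.strip():
--         tokens.append(current_token.strip())
--
--     return tokens
-- ===== SOURCE B (Python) =====
-- from typing import List
--
-- def _tokenize_rule_options(content: str) -> List[str]:
--     """Tokenize rule options: one boundary-finding scan, then slice & strip."""
--     bounds = []
--     in_quotes = False
--     quote_char = None
--     i = 0
--     for char in content:
--         if char in ('"', "'") and (not in_quotes or char == quote_char):
--             in_quotes = not in_quotes
--             quote_char = char if in_quotes else None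
--         elif char == ';' and not in_quotes:
--             bounds.append(i)
--         i += 1
--     parts = []
--     start = 0
--     for b in bounds + [len(content)]:
--         seg = content[start:b].strip()
--         if seg:
--             parts.append(seg)
--         start = b + 1
--     return parts
-- ===== Notes on version B (the rewrite author's own statement) =====
-- stated objective: alternative
-- what changed: Instead of accumulating each token character by character, B's quote-aware scan only records the indices of unquoted semicolons; a second pass slices the string at those boundaries, strips each slice and keeps the non-empty ones.
import Mathlib
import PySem

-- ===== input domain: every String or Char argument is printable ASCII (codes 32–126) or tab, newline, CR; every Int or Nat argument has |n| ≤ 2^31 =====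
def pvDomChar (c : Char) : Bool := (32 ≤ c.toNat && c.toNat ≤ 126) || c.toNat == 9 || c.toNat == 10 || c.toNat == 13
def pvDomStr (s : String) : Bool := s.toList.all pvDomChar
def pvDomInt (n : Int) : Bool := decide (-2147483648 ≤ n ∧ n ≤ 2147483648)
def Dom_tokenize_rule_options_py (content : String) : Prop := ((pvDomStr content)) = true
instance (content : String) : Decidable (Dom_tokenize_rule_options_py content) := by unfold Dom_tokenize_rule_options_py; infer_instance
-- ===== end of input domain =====

-- B replaces A's character-by-character token accumulation with a boundary-index scan plus
-- slice/strip second pass (objective: alternative decomposition, same cost).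

-- ===== PORT A =====
-- loop body of A's 'for char in content' (state: tokens, current_token, in_quotes, quote_char)
def pvStepA (st : List String × List Char × Bool × Option Char) (c : Char) :
    List String × List Char × Bool × Option Char :=
  let (tokens, cur, inq, qc) := st
  if (c == '"' || c == '\'') && (!inq || qc == some c) then
    (tokens, cur ++ [c], !inq, if !inq then some c else none)
  else if c == ';' && !inq then
    (if PySem.Chars.strip cur ≠ [] then tokens ++ [String.ofList (PySem.Chars.strip cur)] else tokens,
     [], inq, qc)
  else
    (tokens, cur ++ [c], inq, qc)

def tokenize_rule_options_py (content : String) : List String :=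
  let st := content.toList.foldl pvStepA ([], [], false, none)
  let (tokens, cur, _, _) := st
  if PySem.Chars.strip cur ≠ [] then tokens ++ [String.ofList (PySem.Chars.strip cur)] else tokens

-- ===== PORT B =====
-- loop body of B's boundary-finding scan (state: bounds, in_quotes, quote_char, i)
def pvStepB (st : List Nat × Bool × Option Char × Nat) (c : Char) :
    List Nat × Bool × Option Char × Nat :=
  let (bounds, inq, qc, i) := st
  if (c == '"' || c == '\'') && (!inq || qc == some c) then
    (bounds, !inq, (if !inq then some c else none), i + 1)
  else if c == ';' && !inq then
    (bounds ++ [i], inq, qc, i + 1)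
  else
    (bounds, inq, qc, i + 1)

-- loop body of B's slicing pass (state: parts, start), over the full char list L
def pvStepP (L : List Char) (st : List String × Nat) (b : Nat) : List String × Nat :=
  let (parts, start) := st
  let seg := PySem.Chars.strip (PySem.List.slice L (some (start : Int)) (some (b : Int)))
  (if seg ≠ [] then parts ++ [String.ofList seg] else parts, b + 1)

def tokenize_rule_options_py_alt (content : String) : List String :=
  let L := content.toList
  let bst := L.foldl pvStepB ([], false, none, 0)
  let bounds := bst.1
  (List.foldl (pvStepP L) ([], 0) (bounds ++ [L.length])).1

-- ===== PRECONDITION & SPEC =====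
def Spec_tokenize_rule_options_py (content : String) (out : List String) : Prop := out = tokenize_rule_options_py_alt content
instance (content : String) (out : List String) : Decidable (Spec_tokenize_rule_options_py content out) := by unfold Spec_tokenize_rule_options_py; infer_instance

-- ===== CLAIM (what is proved, stated in full; the proofs are below) =====
def Claim_equal_tokenize_rule_options_py : Prop := ∀ (content : String), Dom_tokenize_rule_options_py content → Spec_tokenize_rule_options_py content (tokenize_rule_options_py content)

-- ===== LEMMAS AND PROOFS =====

-- common reference semantics: the raw (unstripped) segments the quote-aware split produces
def pvConsHead (c : Char) : List (List Char) → List (List Char)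
  | [] => [[c]]
  | s :: ss => (c :: s) :: ss

def pvSegs : List Char → Bool → Option Char → List (List Char)
  | [], _, _ => [[]]
  | c :: cs, inq, qc =>
    if (c == '"' || c == '\'') && (!inq || qc == some c) then
      pvConsHead c (pvSegs cs (!inq) (if !inq then some c else none))
    else if c == ';' && !inq then
      [] :: pvSegs cs inq qc
    else
      pvConsHead c (pvSegs cs inq qc)

def pvCleanup (ss : List (List Char)) : List String :=
  ss.filterMap (fun s =>
    if PySem.Chars.strip s = [] then none else some (String.ofList (PySem.Chars.strip s)))

def pvMapHead (f : List Char → List Char) : List (List Char) → List (List Char)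
  | [] => []
  | s :: ss => f s :: ss

lemma pvSegs_ne_nil (cs : List Char) (inq : Bool) (qc : Option Char) : pvSegs cs inq qc ≠ [] := by
  cases cs with
  | nil => simp [pvSegs]
  | cons c cs =>
    simp only [pvSegs]
    split
    · cases h : pvSegs cs (!inq) (if !inq then some c else none) <;> simp [pvConsHead]
    · split
      · simp
      · cases h : pvSegs cs inq qc <;> simp [pvConsHead]

lemma pvMapHead_consHead (cur : List Char) (c : Char) (ss : List (List Char)) (h : ss ≠ []) :
    pvMapHead (fun s => (cur ++ [c]) ++ s) ss = pvMapHead (fun s => cur ++ s) (pvConsHead c ss) := by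
  cases ss with
  | nil => exact absurd rfl h
  | cons s ss => simp [pvMapHead, pvConsHead]

lemma pvMapHead_nil_append (ss : List (List Char)) : pvMapHead (fun s => [] ++ s) ss = ss := by
  cases ss <;> simp [pvMapHead]

-- A's fold computes: previous tokens ++ cleaned-up segments (head segment prefixed by current_token)
lemma pvFoldA (cs : List Char) : ∀ (tokens : List String) (cur : List Char) (inq : Bool) (qc : Option Char),
    (let st := cs.foldl pvStepA (tokens, cur, inq, qc)
     let (tokens, cur, _, _) := st
     if PySem.Chars.strip cur ≠ [] then tokens ++ [String.ofList (PySem.Chars.strip cur)] else tokens)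
    = tokens ++ pvCleanup (pvMapHead (fun s => cur ++ s) (pvSegs cs inq qc)) := by
  induction cs with
  | nil =>
    intro tokens cur inq qc
    by_cases h : PySem.Chars.strip cur = [] <;>
      simp [pvSegs, pvMapHead, pvCleanup, h]
  | cons c cs ih =>
    intro tokens cur inq qc
    simp only [List.foldl_cons, pvSegs, pvStepA]
    by_cases h1 : ((c == '"' || c == '\'') && (!inq || qc == some c)) = true
    · simp only [if_pos h1, ih]
      rw [pvMapHead_consHead _ _ _ (pvSegs_ne_nil _ _ _)]
    · by_cases h2 : (c == ';' && !inq) = true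
      · simp only [if_neg h1, if_pos h2, ih]
        have hmh : pvMapHead (fun s => cur ++ s) ([] :: pvSegs cs inq qc)
            = cur :: pvSegs cs inq qc := by simp [pvMapHead]
        rw [pvMapHead_nil_append, hmh]
        simp only [pvCleanup, List.filterMap_cons]
        by_cases h3 : PySem.Chars.strip cur = []
        · simp [h3]
        · simp [h3]
      · simp only [if_neg h1, if_neg h2, ih]
        rw [pvMapHead_consHead _ _ _ (pvSegs_ne_nil _ _ _)]

-- the recursion pvStepB's fold implements on its bounds component
def pvBnd : List Char → Bool → Option Char → Nat → List Nat
  | [], _, _, _ => []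
  | c :: cs, inq, qc, i =>
    if (c == '"' || c == '\'') && (!inq || qc == some c) then
      pvBnd cs (!inq) (if !inq then some c else none) (i + 1)
    else if c == ';' && !inq then
      i :: pvBnd cs inq qc (i + 1)
    else
      pvBnd cs inq qc (i + 1)

lemma pvFoldB (cs : List Char) : ∀ (bounds : List Nat) (inq : Bool) (qc : Option Char) (i : Nat),
    (cs.foldl pvStepB (bounds, inq, qc, i)).1 = bounds ++ pvBnd cs inq qc i := by
  induction cs with
  | nil => intro bounds inq qc i; simp [pvBnd]
  | cons c cs ih =>
    intro bounds inq qc i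
    simp only [List.foldl_cons, pvBnd, pvStepB]
    by_cases h1 : ((c == '"' || c == '\'') && (!inq || qc == some c)) = true
    · simp [h1, ih]
    · by_cases h2 : (c == ';' && !inq) = true
      · simp [h1, h2, ih]
      · simp [h1, h2, ih]

lemma pvBnd_ge (cs : List Char) : ∀ (inq : Bool) (qc : Option Char) (i : Nat) (b : Nat),
    b ∈ pvBnd cs inq qc i → i ≤ b := by
  induction cs with
  | nil => intro _ _ _ _ h; simp [pvBnd] at h
  | cons c cs ih =>
    intro inq qc i b h
    simp only [pvBnd] at h
    split at h
    · exact Nat.le_of_succ_le (ih _ _ _ _ h)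
    · split at h
      · rcases List.mem_cons.mp h with h | h
        · omega
        · exact Nat.le_of_succ_le (ih _ _ _ _ h)
      · exact Nat.le_of_succ_le (ih _ _ _ _ h)

-- the raw segments that B's slicing pass reconstructs from a bounds list
def pvSlices (L : List Char) (start : Nat) : List Nat → List (List Char)
  | [] => [L.drop start]
  | b :: bs => (L.drop start).take (b - start) :: pvSlices L (b + 1) bs

lemma pvDrop_succ_of_drop_cons {L : List Char} {start : Nat} {c : Char} {cs : List Char}
    (h : L.drop start = c :: cs) : L.drop (start + 1) = cs := by
  have : L.drop (start + 1) = (L.drop start).tail := by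
    rw [← List.drop_drop]; simp
  rw [this, h]; rfl

lemma pvSlices_shift {L : List Char} {start : Nat} {c : Char} {cs : List Char}
    (h : L.drop start = c :: cs) (bs : List Nat) (hb : ∀ b ∈ bs, start + 1 ≤ b) :
    pvSlices L start bs = pvConsHead c (pvSlices L (start + 1) bs) := by
  cases bs with
  | nil =>
    simp [pvSlices, pvConsHead, h, pvDrop_succ_of_drop_cons h]
  | cons b bs =>
    have hb1 : start + 1 ≤ b := hb b (List.mem_cons_self ..)
    have : b - start = (b - (start + 1)) + 1 := by omega
    simp [pvSlices, pvConsHead, h, pvDrop_succ_of_drop_cons h, this]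

lemma pvSlices_eq_segs (cs : List Char) : ∀ (inq : Bool) (qc : Option Char) (L : List Char) (start : Nat),
    L.drop start = cs → pvSlices L start (pvBnd cs inq qc start) = pvSegs cs inq qc := by
  induction cs with
  | nil => intro inq qc L start h; simp [pvBnd, pvSlices, pvSegs, h]
  | cons c cs ih =>
    intro inq qc L start h
    have h' : L.drop (start + 1) = cs := pvDrop_succ_of_drop_cons h
    simp only [pvBnd, pvSegs]
    by_cases h1 : ((c == '"' || c == '\'') && (!inq || qc == some c)) = true
    · simp only [if_pos h1]
      rw [pvSlices_shift h _ (fun b hb => pvBnd_ge _ _ _ _ _ hb), ih _ _ _ _ h']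
    · by_cases h2 : (c == ';' && !inq) = true
      · simp only [if_neg h1, if_pos h2, pvSlices, Nat.sub_self, List.take_zero]
        rw [ih _ _ _ _ h']
      · simp only [if_neg h1, if_neg h2]
        rw [pvSlices_shift h _ (fun b hb => pvBnd_ge _ _ _ _ _ hb), ih _ _ _ _ h']

lemma pvFoldP (L : List Char) (bs : List Nat) : ∀ (parts : List String) (start : Nat),
    (List.foldl (pvStepP L) (parts, start) (bs ++ [L.length])).1
    = parts ++ pvCleanup (pvSlices L start bs) := by
  induction bs with
  | nil =>
    intro parts start
    have hsl : PySem.List.slice L (some (start : Int)) (some ((L.length : Nat) : Int))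
        = (L.drop start).take (L.length - start) := PySem.List.slice_natCast L start L.length
    have htk : (L.drop start).take (L.length - start) = L.drop start := by
      apply List.take_of_length_le; simp
    simp only [List.nil_append, List.foldl_cons, List.foldl_nil, pvStepP, hsl, htk,
      pvSlices, pvCleanup, List.filterMap]
    split_ifs with h <;> simp_all
  | cons b bs ih =>
    intro parts start
    have hsl : PySem.List.slice L (some (start : Int)) (some ((b : Nat) : Int))
        = (L.drop start).take (b - start) := PySem.List.slice_natCast L start b
    simp only [List.cons_append, List.foldl_cons, pvStepP, hsl, ih, pvSlices, pvCleanup,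
      List.filterMap_cons]
    split_ifs with h <;> simp_all

-- ===== VERDICT (by name: the statement is the Claim_ definition above) =====
theorem tokenize_rule_options_py_spec : Claim_equal_tokenize_rule_options_py := by
  intro content _
  show tokenize_rule_options_py content = tokenize_rule_options_py_alt content
  have e1 : tokenize_rule_options_py content
      = [] ++ pvCleanup (pvMapHead (fun s => ([] : List Char) ++ s) (pvSegs content.toList false none)) :=
    pvFoldA content.toList [] [] false none
  have e2 : tokenize_rule_options_py_alt content
      = (List.foldl (pvStepP content.toList) ([], 0)
          ((List.foldl pvStepB ([], false, none, 0) content.toList).1 ++ [content.toList.length])).1 := rfl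
  rw [e1, e2, pvFoldB]
  simp only [List.nil_append]
  rw [pvFoldP, pvSlices_eq_segs content.toList false none content.toList 0 (by simp)]
  cases pvSegs content.toList false none <;> simp [pvMapHead]
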